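-- pv_equiv track=rewrite | github.com/jyj1206/BaekJoon | 알고리즘 중급 1/801_분할 정복 (연습)/1891_사분면.py | loc
-- ===== SOURCE A (Python) =====
-- def loc(n, b_i, b_j, i, j, ans):
--   if n == 1:
--     return ans
--
--   half_n = n//2
--   if i< b_i + half_n and j < b_j + half_n:
--     return loc(half_n, b_i, b_j, i, j, ans + '2')
--   elif i < b_i + half_n and b_j + half_n <= j :
--     return loc(half_n, b_i, b_j + half_n , i, j, ans + '1')
--   elif b_i + half_n <= i and j < b_j + half_n :
--     return loc(half_n, b_i + half_n, b_j, i, j, ans + '3')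
--   else :
--     return loc(half_n, b_i + half_n, b_j + half_n, i, j, ans + '4')
-- ===== SOURCE B (Python) =====
-- def loc(n, b_i, b_j, i, j, ans):
--     # Work in coordinates relative to the block corner and walk the halving
--     # sequence iteratively; each level tests the two bits (di >= half, dj >= half).
--     di = i - b_i
--     dj = j - b_j
--     half = n // 2
--     while half >= 1:
--         ti = di >= half
--         tj = dj >= half
--         ans += '4' if ti and tj else '3' if ti else '1' if tj else '2'
--         if ti:
--             di -= half
--         if tj:
--             dj -= half
--         half //= 2
--     return ans
-- ===== Notes on version B (the rewrite author's own statement) =====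
-- stated objective: simpler
-- what changed: Replaces the four-branch tail recursion over absolute coordinates by an iterative loop over coordinates made relative to the block corner, so each level is two independent bit tests and subtractions instead of four absolute-range comparisons and corner updates.
import Mathlib
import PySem

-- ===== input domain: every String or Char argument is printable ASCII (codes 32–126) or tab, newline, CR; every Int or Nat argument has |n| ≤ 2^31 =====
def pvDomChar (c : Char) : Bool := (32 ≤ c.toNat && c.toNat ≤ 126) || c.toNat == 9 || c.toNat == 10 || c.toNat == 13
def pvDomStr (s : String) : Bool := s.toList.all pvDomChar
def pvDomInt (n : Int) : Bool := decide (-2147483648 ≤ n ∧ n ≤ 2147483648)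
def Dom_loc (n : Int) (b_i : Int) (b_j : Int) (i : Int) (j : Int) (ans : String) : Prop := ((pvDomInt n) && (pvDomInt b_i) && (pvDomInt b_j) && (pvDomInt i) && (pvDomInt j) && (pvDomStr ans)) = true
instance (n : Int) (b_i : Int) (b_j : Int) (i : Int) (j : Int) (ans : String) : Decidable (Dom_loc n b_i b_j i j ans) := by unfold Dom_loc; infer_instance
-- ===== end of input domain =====

-- B replaces A's four-branch tail recursion over absolute coordinates by an iterative
-- loop over corner-relative coordinates (two bit tests per level); objective: simpler.

-- ===== PORT A =====
-- fuel only makes A's recursion total; for n ≥ 1 (Pre_loc) fuel n.toNat is never exhausted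
def locFuel (fuel : Nat) (n : Int) (b_i : Int) (b_j : Int) (i : Int) (j : Int) (ans : String) : String :=
  match fuel with
  | 0 => ans
  | f + 1 =>
    if n = 1 then ans
    else
      let half_n := PySem.Int.floordiv n 2
      if i < b_i + half_n ∧ j < b_j + half_n then
        locFuel f half_n b_i b_j i j (ans ++ "2")
      else if i < b_i + half_n ∧ b_j + half_n ≤ j then
        locFuel f half_n b_i (b_j + half_n) i j (ans ++ "1")
      else if b_i + half_n ≤ i ∧ j < b_j + half_n then
        locFuel f half_n (b_i + half_n) b_j i j (ans ++ "3")
      else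
        locFuel f half_n (b_i + half_n) (b_j + half_n) i j (ans ++ "4")

def loc (n : Int) (b_i : Int) (b_j : Int) (i : Int) (j : Int) (ans : String) : String :=
  locFuel n.toNat n b_i b_j i j ans

-- ===== PORT B =====
-- fuel only makes B's while-loop total; for n ≥ 1 fuel n.toNat is never exhausted
def locAltFuel (fuel : Nat) (half : Int) (di : Int) (dj : Int) (ans : String) : String :=
  match fuel with
  | 0 => ans
  | f + 1 =>
    if 1 ≤ half then
      let ti := half ≤ di
      let tj := half ≤ dj
      let ans' := ans ++ (if ti ∧ tj then "4" else if ti then "3" else if tj then "1" else "2")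
      locAltFuel f (PySem.Int.floordiv half 2) (if ti then di - half else di) (if tj then dj - half else dj) ans'
    else ans

def loc_alt (n : Int) (b_i : Int) (b_j : Int) (i : Int) (j : Int) (ans : String) : String :=
  locAltFuel n.toNat (PySem.Int.floordiv n 2) (i - b_i) (j - b_j) ans

-- ===== PRECONDITION & SPEC =====
-- A terminates exactly when repeated halving reaches 1, i.e. n ≥ 1; for n ≤ 0 the
-- Python A recurses forever on n//2 and raises RecursionError.
def Pre_loc (n : Int) (b_i : Int) (b_j : Int) (i : Int) (j : Int) (ans : String) : Prop := 1 ≤ n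
instance (n : Int) (b_i : Int) (b_j : Int) (i : Int) (j : Int) (ans : String) : Decidable (Pre_loc n b_i b_j i j ans) := by unfold Pre_loc; infer_instance
def pvWitness_loc : Int × Int × Int × Int × Int × String := (4, 0, 0, 2, 1, "")

def Spec_loc (n : Int) (b_i : Int) (b_j : Int) (i : Int) (j : Int) (ans : String) (out : String) : Prop := out = loc_alt n b_i b_j i j ans
instance (n : Int) (b_i : Int) (b_j : Int) (i : Int) (j : Int) (ans : String) (out : String) : Decidable (Spec_loc n b_i b_j i j ans out) := by unfold Spec_loc; infer_instance

-- ===== CLAIM (what is proved, stated in full; the proofs are below) =====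
def Claim_equal_loc : Prop := ∀ (n : Int) (b_i : Int) (b_j : Int) (i : Int) (j : Int) (ans : String), Dom_loc n b_i b_j i j ans → Pre_loc n b_i b_j i j ans → Spec_loc n b_i b_j i j ans (loc n b_i b_j i j ans)
-- ===== LEMMAS AND PROOFS =====

theorem locFuel_eq_altFuel (f : Nat) : ∀ (n b_i b_j i j : Int) (ans : String), 1 ≤ n →
    locFuel f n b_i b_j i j ans = locAltFuel f (PySem.Int.floordiv n 2) (i - b_i) (j - b_j) ans := by
  induction f with
  | zero => intro n b_i b_j i j ans _; rfl
  | succ f ih =>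
    intro n b_i b_j i j ans hn
    by_cases h1 : n = 1
    · subst h1
      simp [locFuel, locAltFuel]
    · have h2 : 2 ≤ n := by omega
      have hhalf : PySem.Int.floordiv n 2 = n / 2 := PySem.Int.floordiv_eq_ediv_of_pos (by omega)
      have hpos : 1 ≤ PySem.Int.floordiv n 2 := by rw [hhalf]; omega
      set h := PySem.Int.floordiv n 2 with hh
      rw [locFuel, locAltFuel]
      simp only [h1, if_false, hpos, if_pos]
      split_ifs <;>
        first
          | (exfalso; omega)
          | (rw [ih _ _ _ _ _ _ hpos]
             all_goals congr 1 <;> first | rfl | ring)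

-- ===== VERDICT (by name: the statement is the Claim_ definition above) =====
theorem loc_spec : Claim_equal_loc := by
  intro n b_i b_j i j ans _ hpre
  unfold Spec_loc loc loc_alt
  exact locFuel_eq_altFuel n.toNat n b_i b_j i j ans hpre
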